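-- pv_equiv track=rewrite | github.com/joseishere/jose_test2 | question6_jose.py | checkBool
-- ===== SOURCE A (Python) =====
-- def checkBool(end):
--     parenCount = 0
--     curlyCount = 0
--     startBool = False
--     totalBool = False
--     for char in end:
--         if(char == '('):
--             parenCount += 1
--         elif(char == ')'):
--             parenCount -= 1
--         elif(char == '{'):
--             curlyCount += 1
--         elif(char == '}'):
--             curlyCount -= 1
--         elif(char == '>' or char == '<' or char == '='):
--             startBool = True
--         if(startBool and char == '='):
--             totalBool = True
--             startBool = False
--     return (startBool or totalBool) and (curlyCount == 0) and (parenCount == 0)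
-- ===== SOURCE B (Python) =====
-- def checkBool(end):
--     balanced = end.count('(') == end.count(')') and end.count('{') == end.count('}')
--     hasBool = any(c == '<' or c == '>' or c == '=' for c in end)
--     return balanced and hasBool
-- ===== Notes on version B (the rewrite author's own statement) =====
-- stated objective: simpler
-- what changed: Replaced the single stateful loop (four running bracket counters plus the startBool/totalBool flag machine) by three independent declarative conditions: two count() equalities for bracket balance and one any() over the characters for the presence of a comparison character, after proving that the flag machine's final disjunction is exactly the presence of such a character.
import Mathlib
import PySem

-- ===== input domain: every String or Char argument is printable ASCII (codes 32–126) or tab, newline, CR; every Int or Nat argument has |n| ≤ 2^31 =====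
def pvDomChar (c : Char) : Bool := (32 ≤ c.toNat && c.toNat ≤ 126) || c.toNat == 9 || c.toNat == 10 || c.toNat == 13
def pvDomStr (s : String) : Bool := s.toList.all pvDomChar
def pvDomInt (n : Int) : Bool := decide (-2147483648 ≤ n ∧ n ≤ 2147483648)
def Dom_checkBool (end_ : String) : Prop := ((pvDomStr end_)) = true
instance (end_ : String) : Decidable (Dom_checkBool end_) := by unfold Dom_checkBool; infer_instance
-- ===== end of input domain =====

-- B replaces A's single stateful loop (bracket counters + startBool/totalBool flags) by three
-- independent conditions: two count-equalities for balance and an any() for <,>,= presence (simpler).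


-- ===== PORT A =====
-- one loop iteration of A: state (parenCount, curlyCount, startBool, totalBool)
def checkBoolStep (s : Int × Int × Bool × Bool) (char : Char) : Int × Int × Bool × Bool :=
  let (parenCount, curlyCount, startBool, totalBool) := s
  let (parenCount, curlyCount, startBool) :=
    if char = '(' then (parenCount + 1, curlyCount, startBool)
    else if char = ')' then (parenCount - 1, curlyCount, startBool)
    else if char = '{' then (parenCount, curlyCount + 1, startBool)
    else if char = '}' then (parenCount, curlyCount - 1, startBool)
    else if char = '>' ∨ char = '<' ∨ char = '=' then (parenCount, curlyCount, true)
    else (parenCount, curlyCount, startBool)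
  if startBool ∧ char = '=' then (parenCount, curlyCount, false, true)
  else (parenCount, curlyCount, startBool, totalBool)

def checkBool (end_ : String) : Bool :=
  let s := end_.toList.foldl checkBoolStep (0, 0, false, false)
  (s.2.2.1 || s.2.2.2) && decide (s.2.1 = 0) && decide (s.1 = 0)

-- ===== PORT B =====
def checkBool_alt (end_ : String) : Bool :=
  let balanced := decide (PySem.Str.count end_ "(" = PySem.Str.count end_ ")")
                  && decide (PySem.Str.count end_ "{" = PySem.Str.count end_ "}")
  let hasBool := end_.toList.any (fun c => c = '<' || c = '>' || c = '=')
  balanced && hasBool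

-- ===== PRECONDITION & SPEC =====
def Spec_checkBool (end_ : String) (out : Bool) : Prop := out = checkBool_alt end_
instance (end_ : String) (out : Bool) : Decidable (Spec_checkBool end_ out) := by unfold Spec_checkBool; infer_instance

-- ===== CLAIM (what is proved, stated in full; the proofs are below) =====
def Claim_equal_checkBool : Prop := ∀ (end_ : String), Dom_checkBool end_ → Spec_checkBool end_ (checkBool end_)

-- ===== LEMMAS AND PROOFS =====

-- full characterisation of A's loop from an arbitrary state
theorem checkBool_loop_spec (l : List Char) (p q : Int) (sb tb : Bool) :
    (l.foldl checkBoolStep (p, q, sb, tb)).1 = p + (l.count '(' : Int) - (l.count ')' : Int)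
    ∧ (l.foldl checkBoolStep (p, q, sb, tb)).2.1 = q + (l.count '{' : Int) - (l.count '}' : Int)
    ∧ ((l.foldl checkBoolStep (p, q, sb, tb)).2.2.1 || (l.foldl checkBoolStep (p, q, sb, tb)).2.2.2)
        = (sb || tb || l.any (fun c => c = '<' || c = '>' || c = '=')) := by
  induction l generalizing p q sb tb with
  | nil => simp
  | cons c l ih =>
    simp only [List.foldl_cons, List.count_cons, List.any_cons, checkBoolStep]
    by_cases h1 : c = '('
    · subst h1
      have := ih (p + 1) q sb tb
      simp at this ⊢
      refine ⟨by omega, by omega, ?_⟩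
      simp [this.2.2]
    · by_cases h2 : c = ')'
      · subst h2
        have := ih (p - 1) q sb tb
        simp [h1] at this ⊢
        refine ⟨by omega, by omega, ?_⟩
        simp [this.2.2]
      · by_cases h3 : c = '{'
        · subst h3
          have := ih p (q + 1) sb tb
          simp [h1, h2] at this ⊢
          refine ⟨by omega, by omega, ?_⟩
          simp [this.2.2]
        · by_cases h4 : c = '}'
          · subst h4
            have := ih p (q - 1) sb tb
            simp [h1, h2, h3] at this ⊢
            refine ⟨by omega, by omega, ?_⟩
            simp [this.2.2]
          · by_cases h5 : c = '='
            · subst h5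
              have := ih p q false true
              simp [h1, h2, h3, h4] at this ⊢
              refine ⟨by omega, by omega, ?_⟩
              simp [this.2.2]
            · by_cases h6 : c = '>' ∨ c = '<'
              · have hne : ¬ (c = '>' ∨ c = '<' ∨ c = '=') → False := by tauto
                have := ih p q true tb
                rcases h6 with h6 | h6 <;> subst h6 <;>
                  simp [h1, h2, h3, h4] at this ⊢ <;>
                  refine ⟨by omega, by omega, ?_⟩ <;> simp [this.2.2]
              · rw [not_or] at h6
                have := ih p q sb tb
                simp [h1, h2, h3, h4, h5, h6.1, h6.2] at this ⊢
                refine ⟨by omega, by omega, ?_⟩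
                simp [this.2.2]

-- Chars.count.go with a single-character needle walks the list once, counting that character
theorem go_single (c : Char) : ∀ (l : List Char) (fuel acc : Nat), l.length ≤ fuel →
    PySem.Chars.count.go [c] fuel l acc = acc + l.count c := by
  intro l
  induction l with
  | nil => intro fuel acc h; cases fuel <;> simp [PySem.Chars.count.go]
  | cons a t ih =>
    intro fuel acc h
    cases fuel with
    | zero => simp at h
    | succ f =>
      simp only [PySem.Chars.count.go]
      simp at h
      by_cases hc : a = c
      · subst hc
        simp [List.isPrefixOf, ih f (acc + 1) h]
        omega
      · simp [List.isPrefixOf, hc, ih f acc h,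
          (by simpa using (Ne.symm hc) : ¬ (c == a) = true)]

-- Str.count with a single-character needle counts that character
theorem str_count_single (s : String) (c : Char) :
    PySem.Str.count s (String.ofList [c]) = s.toList.count c := by
  simp only [PySem.Str.count_eq, PySem.Chars.count, String.toList_ofList,
    List.isEmpty_cons, Bool.false_eq_true, if_false]
  simpa using go_single c s.toList s.toList.length 0 le_rfl

-- ===== VERDICT (by name: the statement is the Claim_ definition above) =====
theorem checkBool_spec : Claim_equal_checkBool := by
  intro end_ _
  unfold Spec_checkBool checkBool checkBool_alt
  obtain ⟨h1, h2, h3⟩ := checkBool_loop_spec end_.toList 0 0 false false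
  simp only [h1, h2, h3, Bool.false_or]
  have c1 : PySem.Str.count end_ "(" = end_.toList.count '(' := str_count_single end_ '('
  have c2 : PySem.Str.count end_ ")" = end_.toList.count ')' := str_count_single end_ ')'
  have c3 : PySem.Str.count end_ "{" = end_.toList.count '{' := str_count_single end_ '{'
  have c4 : PySem.Str.count end_ "}" = end_.toList.count '}' := str_count_single end_ '}'
  simp only [c1, c2, c3, c4]
  have e1 : decide ((0 : Int) + (end_.toList.count '(' : Int) - (end_.toList.count ')' : Int) = 0)
      = decide (end_.toList.count '(' = end_.toList.count ')') := by
    simp only [decide_eq_decide]; omega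
  have e2 : decide ((0 : Int) + (end_.toList.count '{' : Int) - (end_.toList.count '}' : Int) = 0)
      = decide (end_.toList.count '{' = end_.toList.count '}') := by
    simp only [decide_eq_decide]; omega
  rw [e1, e2]
  cases hA : end_.toList.any (fun c => c = '<' || c = '>' || c = '=') <;>
    simp [Bool.and_comm]
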